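-- pv_equiv track=rewrite | github.com/emiz6413/PII | scripts/prep.py | convert_span
-- ===== SOURCE A (Python) =====
-- def convert_span(span: tuple[int, int], alignment: list[list[int]]) -> tuple[int, int]:
--     # alignment should be an alignment returned by alignments.get_alignment
--     start, end = span
--     if start < 0 or end < 0:
--         return -1, -1
--     indices = [i for ilis in alignment[start:end] for i in ilis]
--     if not indices:
--         return -1, -1
--     return (indices[0], indices[-1] + 1)
-- ===== SOURCE B (Python) =====
-- def convert_span(span, alignment):
--     # Two-ended scan: find first/last non-empty token list in the slice
--     # without building the flattened index list.
--     start, end = span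
--     if start < 0 or end < 0:
--         return -1, -1
--     seg = alignment[start:end]
--     lo = None
--     for ilis in seg:
--         if ilis:
--             lo = ilis[0]
--             break
--     if lo is None:
--         return -1, -1
--     hi = 0
--     for ilis in reversed(seg):
--         if ilis:
--             hi = ilis[-1] + 1
--             break
--     return lo, hi
-- ===== Notes on version B (the rewrite author's own statement) =====
-- stated objective: alternative
-- what changed: Instead of flattening the whole slice into one index list, B scans the slice forward for the first non-empty sublist and backward for the last one, never materializing the flattened list.
import Mathlib
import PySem

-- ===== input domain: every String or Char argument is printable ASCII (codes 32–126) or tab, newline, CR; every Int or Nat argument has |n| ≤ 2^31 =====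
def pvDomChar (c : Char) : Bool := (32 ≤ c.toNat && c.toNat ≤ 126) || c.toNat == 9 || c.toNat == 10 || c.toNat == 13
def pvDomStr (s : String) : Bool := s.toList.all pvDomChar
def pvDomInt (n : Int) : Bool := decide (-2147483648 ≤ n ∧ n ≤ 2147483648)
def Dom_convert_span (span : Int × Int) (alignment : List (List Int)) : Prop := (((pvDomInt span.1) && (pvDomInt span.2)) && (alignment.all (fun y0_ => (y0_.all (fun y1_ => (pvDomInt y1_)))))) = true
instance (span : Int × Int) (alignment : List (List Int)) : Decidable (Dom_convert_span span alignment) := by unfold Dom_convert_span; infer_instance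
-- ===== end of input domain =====

-- B scans the slice from both ends for the first/last non-empty sublist instead of flattening it.

-- ===== PORT A =====
def convert_span (span : Int × Int) (alignment : List (List Int)) : Int × Int :=
  let start := span.1
  let «end» := span.2
  if start < 0 ∨ «end» < 0 then (-1, -1)
  else
    -- [i for ilis in alignment[start:end] for i in ilis]
    let indices := (PySem.List.slice alignment start «end»).flatMap (fun ilis => ilis)
    match indices with
    | [] => (-1, -1)
    | x :: rest => (x, (x :: rest).getLast (by simp) + 1)

-- ===== PORT B =====
-- forward scan: first element of the first non-empty sublist
def pvFindLo : List (List Int) → Option Int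
  | [] => none
  | l :: ls => match l with
    | [] => pvFindLo ls
    | x :: _ => some x

-- scan (applied to the reversed slice): last element of the first non-empty sublist, + 1
def pvFindHi : List (List Int) → Option Int
  | [] => none
  | l :: ls => match l.getLast? with
    | none => pvFindHi ls
    | some v => some (v + 1)

def convert_span_alt (span : Int × Int) (alignment : List (List Int)) : Int × Int :=
  let start := span.1
  let «end» := span.2
  if start < 0 ∨ «end» < 0 then (-1, -1)
  else
    let seg := PySem.List.slice alignment start «end»
    match pvFindLo seg with
    | none => (-1, -1)
    | some lo => (lo, (pvFindHi seg.reverse).getD 0)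

-- ===== PRECONDITION & SPEC =====
def Spec_convert_span (span : Int × Int) (alignment : List (List Int)) (out : Int × Int) : Prop := out = convert_span_alt span alignment
instance (span : Int × Int) (alignment : List (List Int)) (out : Int × Int) : Decidable (Spec_convert_span span alignment out) := by unfold Spec_convert_span; infer_instance

-- ===== CLAIM (what is proved, stated in full; the proofs are below) =====
def Claim_equal_convert_span : Prop := ∀ (span : Int × Int) (alignment : List (List Int)), Dom_convert_span span alignment → Spec_convert_span span alignment (convert_span span alignment)

-- ===== LEMMAS AND PROOFS =====

theorem pvFindLo_eq_head? (seg : List (List Int)) :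
    pvFindLo seg = seg.flatten.head? := by
  induction seg with
  | nil => rfl
  | cons l ls ih =>
    cases l with
    | nil => simpa [pvFindLo] using ih
    | cons x xs => simp [pvFindLo]

theorem pvFindHi_append (a b : List (List Int)) :
    pvFindHi (a ++ b) = (pvFindHi a).or (pvFindHi b) := by
  induction a with
  | nil => rfl
  | cons l ls ih =>
    cases h : l.getLast? with
    | none => simp [pvFindHi, h, ih]
    | some v => simp [pvFindHi, h]

theorem pvFindHi_reverse (seg : List (List Int)) :
    pvFindHi seg.reverse = seg.flatten.getLast?.map (· + 1) := by
  induction seg with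
  | nil => rfl
  | cons l ls ih =>
    rw [List.reverse_cons, pvFindHi_append, ih]
    cases h : ls.flatten.getLast? with
    | none =>
      have hnil : ls.flatten = [] := by
        cases hf : ls.flatten with
        | nil => rfl
        | cons y ys => rw [hf] at h; simp at h
      simp only [List.flatten_cons, hnil, List.append_nil]
      cases hl : l.getLast? <;> simp [pvFindHi, hl, Option.or]
    | some v =>
      have : (l ++ ls.flatten).getLast? = some v := by
        rw [List.getLast?_append]; simp [h]
      simp [this, Option.or]

-- ===== VERDICT (by name: the statement is the Claim_ definition above) =====
theorem convert_span_spec : Claim_equal_convert_span := by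
  intro span alignment _
  unfold Spec_convert_span convert_span convert_span_alt
  by_cases hneg : span.1 < 0 ∨ span.2 < 0
  · simp [hneg]
  · simp only [hneg, if_false]
    set seg := PySem.List.slice alignment span.1 span.2 with hseg
    rw [pvFindLo_eq_head?, pvFindHi_reverse]
    cases hf : seg.flatten with
    | nil => simp [hf]
    | cons x rest =>
      have hlast : (x :: rest).getLast? = some ((x :: rest).getLast (by simp)) :=
        List.getLast?_eq_some_getLast (l := x :: rest) (h := by simp)
      simp [hf, hlast]
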